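-- pv_equiv track=rewrite | github.com/chenxi-zhou-7/Temporal-Spatial-Separated-SwinUNet | calculate_fs.py | build_alternating_extrema
-- ===== SOURCE A (Python) =====
-- def build_alternating_extrema(peaks, valleys, smoothed):
--     """Merge peaks and valleys and enforce strict alternation.
--
--     When consecutive extrema are of the same type, only the more extreme
--     one is kept (higher for peaks, lower for valleys).
--
--     Args:
--         peaks: Array of peak indices.
--         valleys: Array of valley indices.
--         smoothed: Smoothed curve for value comparison.
--     Returns:
--         List of (index, 'peak'|'valley') tuples in temporal order.
--     """
--     extrema = [(int(idx), "peak") for idx in peaks] + [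
--         (int(idx), "valley") for idx in valleys
--     ]
--     extrema.sort(key=lambda x: x[0])
--
--     alternating = []
--     for idx, kind in extrema:
--         if not alternating:
--             alternating.append((idx, kind))
--             continue
--
--         prev_idx, prev_kind = alternating[-1]
--         if kind != prev_kind:
--             alternating.append((idx, kind))
--             continue
--
--         prev_val = smoothed[prev_idx]
--         curr_val = smoothed[idx]
--
--         if kind == "peak" and curr_val > prev_val:
--             alternating[-1] = (idx, kind)
--         elif kind == "valley" and curr_val < prev_val:
--             alternating[-1] = (idx, kind)
--
--     return alternating
-- ===== SOURCE B (Python) =====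
-- def build_alternating_extrema(peaks, valleys, smoothed):
--     """Merge peaks and valleys and enforce strict alternation.
--
--     Two-pointer formulation: the merged-and-sorted list is never built.
--     Peaks and valleys are sorted separately; a fused two-pointer merge
--     walks both streams, identifies each maximal same-kind run (all peaks
--     up to the next valley, with a peak winning an index tie, or all
--     valleys strictly before the next peak) and emits its single most
--     extreme element (first one on ties).
--     """
--     ps = sorted(int(i) for i in peaks)
--     vs = sorted(int(i) for i in valleys)
--     out = []
--     i, j = 0, 0
--     while i < len(ps) or j < len(vs):
--         if j == len(vs) or (i < len(ps) and ps[i] <= vs[j]):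
--             k = i
--             while k < len(ps) and (j == len(vs) or ps[k] <= vs[j]):
--                 k += 1
--             run = ps[i:k]
--             best = run[0] if len(run) == 1 else max(run, key=lambda t: smoothed[t])
--             out.append((best, "peak"))
--             i = k
--         else:
--             k = j
--             while k < len(vs) and (i == len(ps) or vs[k] < ps[i]):
--                 k += 1
--             run = vs[j:k]
--             best = run[0] if len(run) == 1 else min(run, key=lambda t: smoothed[t])
--             out.append((best, "valley"))
--             j = k
--     return out
-- ===== Notes on version B (the rewrite author's own statement) =====
-- stated objective: alternative
-- what changed: A sorts the merged labelled list and scans it with a running accumulator that peeks at and overwrites alternating[-1]; B never builds the merged list: it sorts peaks and valleys separately and runs a fused two-pointer merge over the two streams, emitting one element per maximal same-kind run (max of the peaks up to the next valley / min of the valleys before the next peak, first extremal on ties).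
import Mathlib
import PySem

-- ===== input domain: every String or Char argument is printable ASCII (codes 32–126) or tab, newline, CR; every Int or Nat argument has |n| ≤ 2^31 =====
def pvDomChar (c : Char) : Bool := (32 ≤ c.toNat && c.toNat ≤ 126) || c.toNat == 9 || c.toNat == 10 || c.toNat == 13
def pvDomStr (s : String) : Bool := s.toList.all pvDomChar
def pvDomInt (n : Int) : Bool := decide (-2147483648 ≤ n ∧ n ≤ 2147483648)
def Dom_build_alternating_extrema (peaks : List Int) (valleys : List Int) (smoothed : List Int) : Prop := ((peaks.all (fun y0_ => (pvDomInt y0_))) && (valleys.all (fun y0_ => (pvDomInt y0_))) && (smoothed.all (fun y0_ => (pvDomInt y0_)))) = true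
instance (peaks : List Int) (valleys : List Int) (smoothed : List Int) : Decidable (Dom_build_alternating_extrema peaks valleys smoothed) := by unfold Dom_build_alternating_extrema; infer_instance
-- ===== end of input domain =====

-- B replaces A's sort-the-merged-list-then-scan-with-an-accumulator by sorting peaks and valleys
-- separately and fusing a two-pointer merge with the run reduction (one output element per maximal
-- same-kind run); objective: alternative algorithmic decomposition, same asymptotic cost.

-- ===== PORT A =====
-- one loop step of A: compare with alternating[-1], append or overwrite it
def pvAStep (smoothed : List Int) (alternating : List (Int × String)) (p : Int × String) : List (Int × String) :=
  match alternating.getLast? with                     -- 'if not alternating' / 'alternating[-1]'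
  | none => alternating ++ [p]
  | some prev =>
    if p.2 ≠ prev.2 then alternating ++ [p]
    else
      let prev_val := PySem.List.pyGetD smoothed prev.1 0   -- smoothed[prev_idx]; Pre_ keeps the index in range
      let curr_val := PySem.List.pyGetD smoothed p.1 0      -- smoothed[idx]
      if p.2 = "peak" ∧ curr_val > prev_val then alternating.dropLast ++ [p]   -- alternating[-1] = (idx, kind)
      else if p.2 = "valley" ∧ curr_val < prev_val then alternating.dropLast ++ [p]
      else alternating

def build_alternating_extrema (peaks : List Int) (valleys : List Int) (smoothed : List Int) : List (Int × String) :=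
  let extrema := PySem.List.sorted
    (peaks.map (fun i => (i, "peak")) ++ valleys.map (fun i => (i, "valley")))
    (fun x => x.1)
  extrema.foldl (pvAStep smoothed) []

-- ===== PORT B =====
-- Source B's two-pointer loop over the two separately sorted streams, as structural recursion on the
-- suffixes ps, vs (= the Python indices i, j). Each iteration peels one maximal same-kind run
-- (takeWhile/dropWhile = the inner 'while k' scan) and emits its most extreme element; a singleton
-- run does not consult smoothed (Source B's 'len(run) == 1' guard). max?/min? = Python max/min with
-- key, first extremal on ties; the run is nonempty, so '.getD' never supplies its default.
def pvBLoop (s : List Int) : List Int → List Int → List (Int × String)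
  | [], [] => []
  | [], v :: vs' =>                                   -- peaks exhausted: one run of all remaining valleys
    let run := v :: vs'
    let best := if run.length == 1 then v
      else (PySem.List.min? run (fun t => PySem.List.pyGetD s t 0)).getD v
    [(best, "valley")]
  | p :: ps', [] =>                                   -- valleys exhausted: one run of all remaining peaks
    let run := p :: ps'
    let best := if run.length == 1 then p
      else (PySem.List.max? run (fun t => PySem.List.pyGetD s t 0)).getD p
    [(best, "peak")]
  | p :: ps', v :: vs' =>
    if p ≤ v then                                     -- peak run: all peaks up to (and tying) the next valley
      let run := p :: ps'.takeWhile (fun t => t ≤ v)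
      let rest := ps'.dropWhile (fun t => t ≤ v)
      let best := if run.length == 1 then p
        else (PySem.List.max? run (fun t => PySem.List.pyGetD s t 0)).getD p
      (best, "peak") :: pvBLoop s rest (v :: vs')
    else                                              -- valley run: all valleys strictly before the next peak
      let run := v :: vs'.takeWhile (fun t => t < p)
      let rest := vs'.dropWhile (fun t => t < p)
      let best := if run.length == 1 then v
        else (PySem.List.min? run (fun t => PySem.List.pyGetD s t 0)).getD v
      (best, "valley") :: pvBLoop s (p :: ps') rest
  termination_by ps vs => ps.length + vs.length
  decreasing_by
  · have := List.length_dropWhile_le (fun t => decide (t ≤ v)) ps'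
    simp; omega
  · have := List.length_dropWhile_le (fun t => decide (t < p)) vs'
    simp; omega

def build_alternating_extrema_alt (peaks : List Int) (valleys : List Int) (smoothed : List Int) : List (Int × String) :=
  let ps := PySem.List.sorted peaks (fun i => i)
  let vs := PySem.List.sorted valleys (fun i => i)
  pvBLoop smoothed ps vs

-- ===== PRECONDITION & SPEC =====
-- Pre_ excludes exactly the inputs on which the Pythons raise IndexError: smoothed is looked up
-- (by both A and B) precisely at the members of same-kind adjacent pairs of the index-sorted merged
-- extrema list, so every such member must be a valid Python index into smoothed.
def Pre_build_alternating_extrema (peaks : List Int) (valleys : List Int) (smoothed : List Int) : Prop :=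
  let ext := PySem.List.sorted
    (peaks.map (fun i => (i, "peak")) ++ valleys.map (fun i => (i, "valley")))
    (fun x => x.1)
  ∀ pr ∈ ext.zip ext.tail, pr.1.2 = pr.2.2 →
    PySem.Raise.InRange smoothed.length pr.1.1 ∧ PySem.Raise.InRange smoothed.length pr.2.1
instance (peaks : List Int) (valleys : List Int) (smoothed : List Int) : Decidable (Pre_build_alternating_extrema peaks valleys smoothed) := by unfold Pre_build_alternating_extrema; infer_instance

def pvWitness_build_alternating_extrema : List Int × List Int × List Int := ([1, 3], [0, 2], [5, 9, 1, 7])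

def Spec_build_alternating_extrema (peaks : List Int) (valleys : List Int) (smoothed : List Int) (out : List (Int × String)) : Prop := out = build_alternating_extrema_alt peaks valleys smoothed
instance (peaks : List Int) (valleys : List Int) (smoothed : List Int) (out : List (Int × String)) : Decidable (Spec_build_alternating_extrema peaks valleys smoothed out) := by unfold Spec_build_alternating_extrema; infer_instance

-- ===== CLAIM (what is proved, stated in full; the proofs are below) =====
def Claim_equal_build_alternating_extrema : Prop := ∀ (peaks : List Int) (valleys : List Int) (smoothed : List Int), Dom_build_alternating_extrema peaks valleys smoothed → Pre_build_alternating_extrema peaks valleys smoothed → Spec_build_alternating_extrema peaks valleys smoothed (build_alternating_extrema peaks valleys smoothed)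

-- ===== LEMMAS AND PROOFS =====

-- proof-side development: middlemen and lemmas

def pvMergeT : List (Int × String) → List (Int × String) → List (Int × String)
  | [], b => b
  | x :: a, [] => x :: a
  | x :: a, z :: b =>
    if x.1 ≤ z.1 then x :: pvMergeT a (z :: b)
    else z :: pvMergeT (x :: a) b
  termination_by a b => a.length + b.length

theorem pvInsert_singleton (y : Int × String) : ∀ (a : List (Int × String)),
    PySem.List.insertBy (fun u w => decide (u.1 < w.1)) y a = pvMergeT a [y] := by
  intro a
  induction a with
  | nil => simp [PySem.List.insertBy, pvMergeT]
  | cons x a ih =>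
    simp only [PySem.List.insertBy, pvMergeT]
    by_cases h : y.1 < x.1
    · simp [h, not_le.mpr h]
    · simp [h, not_lt.mp h, ih]

theorem pvInsert_merge (y : Int × String) :
    ∀ (a b : List (Int × String)),
    PySem.List.insertBy (fun u w => decide (u.1 < w.1)) y (pvMergeT a b)
      = pvMergeT a (PySem.List.insertBy (fun u w => decide (u.1 < w.1)) y b) := by
  intro a
  induction a with
  | nil => intro b; simp [pvMergeT]
  | cons x a ih =>
    intro b
    induction b with
    | nil =>
      have h1 : pvMergeT (x :: a) [] = x :: a := by simp [pvMergeT]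
      have h2 : PySem.List.insertBy (fun u w => decide (u.1 < w.1)) y ([] : List (Int × String)) = [y] := by
        simp [PySem.List.insertBy]
      rw [h1, h2, pvInsert_singleton y (x :: a)]
    | cons z b ihb =>
      by_cases hxz : x.1 ≤ z.1
      · by_cases hyz : y.1 < z.1
        · by_cases hyx : y.1 < x.1
          · simp [pvMergeT, PySem.List.insertBy, hxz, hyz, hyx, not_le.mpr hyx]
          · simp [pvMergeT, PySem.List.insertBy, hxz, hyz, hyx, not_lt.mp hyx, ih]
        · have hyx : ¬ y.1 < x.1 := by omega
          simp [pvMergeT, PySem.List.insertBy, hxz, hyz, hyx, ih]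
      · by_cases hyz : y.1 < z.1
        · have hxy : ¬ x.1 ≤ y.1 := by omega
          simp [pvMergeT, PySem.List.insertBy, hxz, hyz, hxy]
        · simp only [pvMergeT, PySem.List.insertBy, hxz, hyz, if_neg, if_false, decide_eq_true_eq] at *
          simp [hxz, hyz, ihb]

def pvTM : List Int → List Int → List (Int × String)
  | [], vs => vs.map (fun v => (v, "valley"))
  | p :: ps, [] => (p :: ps).map (fun q => (q, "peak"))
  | p :: ps, v :: vs =>
    if p ≤ v then (p, "peak") :: pvTM ps (v :: vs)
    else (v, "valley") :: pvTM (p :: ps) vs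
  termination_by ps vs => ps.length + vs.length

theorem pvMergeT_nil_right : ∀ (a : List (Int × String)), pvMergeT a [] = a := by
  intro a; cases a <;> simp [pvMergeT]

theorem pvSorted_append (P V : List (Int × String)) :
    PySem.List.sorted (P ++ V) (fun x => x.1)
      = pvMergeT (PySem.List.sorted P (fun x => x.1)) (PySem.List.sorted V (fun x => x.1)) := by
  rw [PySem.List.sorted_eq_foldl_insertBy, PySem.List.sorted_eq_foldl_insertBy,
    PySem.List.sorted_eq_foldl_insertBy, List.foldl_append]
  have key : ∀ (V' : List (Int × String)) (SP b : List (Int × String)),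
      V'.foldl (fun acc x => PySem.List.insertBy (fun a b => decide (a.1 < b.1)) x acc) (pvMergeT SP b)
        = pvMergeT SP (V'.foldl (fun acc x => PySem.List.insertBy (fun a b => decide (a.1 < b.1)) x acc) b) := by
    intro V'
    induction V' with
    | nil => intro SP b; simp
    | cons y V' ih =>
      intro SP b
      simp only [List.foldl_cons]
      rw [pvInsert_merge y SP b, ih]
  have h0 := key V (P.foldl (fun acc x => PySem.List.insertBy (fun a b => decide (a.1 < b.1)) x acc) []) []
  rw [pvMergeT_nil_right] at h0
  exact h0

theorem pvInsert_map_tag (c : String) (x : Int) : ∀ (l : List Int),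
    PySem.List.insertBy (fun u w => decide (u.1 < w.1)) (x, c) (l.map (fun i => (i, c)))
      = (PySem.List.insertBy (fun a b => decide (a < b)) x l).map (fun i => (i, c)) := by
  intro l
  induction l with
  | nil => simp [PySem.List.insertBy]
  | cons z l ih =>
    simp only [List.map_cons, PySem.List.insertBy]
    by_cases h : x < z
    · simp [h]
    · simp [h, ih]

theorem pvSorted_map_tag (c : String) (l : List Int) :
    PySem.List.sorted (l.map (fun i => (i, c))) (fun x => x.1)
      = (PySem.List.sorted l (fun i => i)).map (fun i => (i, c)) := by
  rw [PySem.List.sorted_eq_foldl_insertBy, PySem.List.sorted_eq_foldl_insertBy, List.foldl_map]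
  have key : ∀ (l' : List Int) (acc : List Int),
      l'.foldl (fun acc t => PySem.List.insertBy (fun a b => decide (a.1 < b.1)) (t, c) acc)
        (acc.map (fun i => (i, c)))
        = (l'.foldl (fun acc t => PySem.List.insertBy (fun a b => decide (a < b)) t acc) acc).map
            (fun i => (i, c)) := by
    intro l'
    induction l' with
    | nil => intro acc; simp
    | cons t l' ih =>
      intro acc
      simp only [List.foldl_cons]
      rw [pvInsert_map_tag c t acc, ih]
  simpa using key l []

theorem pvMergeT_map_eq_TM : ∀ (ps vs : List Int),
    pvMergeT (ps.map (fun i => (i, "peak"))) (vs.map (fun v => (v, "valley"))) = pvTM ps vs := by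
  intro ps
  induction ps with
  | nil => intro vs; simp [pvMergeT, pvTM]
  | cons p ps ih =>
    intro vs
    induction vs with
    | nil => simp [pvMergeT, pvTM]
    | cons v vs ihb =>
      simp only [List.map_cons, pvMergeT, pvTM]
      by_cases h : p ≤ v
      · simpa [h] using ih (v :: vs)
      · simpa [h] using ihb

def pvBRuns (smoothed : List Int) : List (Int × String) → List (Int × String)
  | [] => []
  | p :: rest =>
    let run := p :: rest.takeWhile (fun q => q.2 == p.2)
    let rest' := rest.dropWhile (fun q => q.2 == p.2)
    let best :=
      if run.length == 1 then p
      else if p.2 = "peak" then (PySem.List.max? run (fun x => PySem.List.pyGetD smoothed x.1 0)).getD p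
      else (PySem.List.min? run (fun x => PySem.List.pyGetD smoothed x.1 0)).getD p
    best :: pvBRuns smoothed rest'
  termination_by l => l.length
  decreasing_by
    simpa using Nat.lt_succ_of_le (List.length_dropWhile_le _ rest)

-- takeWhile/dropWhile across an all-true prefix
theorem pvTW_app {α : Type} (pred : α → Bool) :
    ∀ (l₁ l₂ : List α), (∀ x ∈ l₁, pred x = true) →
    (l₁ ++ l₂).takeWhile pred = l₁ ++ l₂.takeWhile pred ∧
    (l₁ ++ l₂).dropWhile pred = l₂.dropWhile pred := by
  intro l₁
  induction l₁ with
  | nil => intro l₂ _; simp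
  | cons x l₁ ih =>
    intro l₂ h
    have hx : pred x = true := h x (by simp)
    have := ih l₂ (fun y hy => h y (by simp [hy]))
    simp [List.takeWhile_cons, List.dropWhile_cons, hx, this.1, this.2]

-- max?/min? over a tagged list = tagged max?/min?
theorem pvMax_map (s : List Int) (c : String) (l : List Int) :
    PySem.List.max? (l.map (fun t => (t, c))) (fun x => PySem.List.pyGetD s x.1 0)
      = (PySem.List.max? l (fun t => PySem.List.pyGetD s t 0)).map (fun t => (t, c)) := by
  simp only [PySem.List.max?, List.foldl_map]
  have h0 : (none : Option (Int × String)) = Option.map (fun t => (t, c)) none := rfl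
  rw [h0]
  refine List.foldl_hom (Option.map (fun t => (t, c))) ?_
  intro x y
  cases x with
  | none => rfl
  | some m => dsimp only [Option.map_some]; split_ifs <;> rfl

theorem pvMin_map (s : List Int) (c : String) (l : List Int) :
    PySem.List.min? (l.map (fun t => (t, c))) (fun x => PySem.List.pyGetD s x.1 0)
      = (PySem.List.min? l (fun t => PySem.List.pyGetD s t 0)).map (fun t => (t, c)) := by
  simp only [PySem.List.min?, List.foldl_map]
  have h0 : (none : Option (Int × String)) = Option.map (fun t => (t, c)) none := rfl
  rw [h0]
  refine List.foldl_hom (Option.map (fun t => (t, c))) ?_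
  intro x y
  cases x with
  | none => rfl
  | some m => dsimp only [Option.map_some]; split_ifs <;> rfl

-- splitting the head run off the two-pointer merge
theorem pvTM_peak_run (v : Int) (vs : List Int) : ∀ (ps : List Int),
    pvTM ps (v :: vs)
      = (ps.takeWhile (fun t => t ≤ v)).map (fun i => (i, "peak"))
        ++ pvTM (ps.dropWhile (fun t => t ≤ v)) (v :: vs) := by
  intro ps
  induction ps with
  | nil => simp
  | cons p ps ih =>
    by_cases h : p ≤ v
    · simp only [pvTM, if_pos h, List.takeWhile_cons, List.dropWhile_cons, h, decide_true]
      simpa using ih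
    · simp [pvTM, List.takeWhile_cons, List.dropWhile_cons, h]

theorem pvTM_valley_run (p : Int) (ps : List Int) : ∀ (vs : List Int),
    pvTM (p :: ps) vs
      = (vs.takeWhile (fun t => t < p)).map (fun i => (i, "valley"))
        ++ pvTM (p :: ps) (vs.dropWhile (fun t => t < p)) := by
  intro vs
  induction vs with
  | nil => simp
  | cons v vs ih =>
    by_cases h : v < p
    · have h' : ¬ p ≤ v := by omega
      simp only [pvTM, if_neg h', List.takeWhile_cons, List.dropWhile_cons, h, decide_true]
      simpa using ih
    · have h' : p ≤ v := by omega
      simp [pvTM, List.takeWhile_cons, List.dropWhile_cons, h, h']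

theorem pvDW_head {α : Type} (pred : α → Bool) :
    ∀ (l : List α) (r : α) (rs : List α), l.dropWhile pred = r :: rs → pred r = false := by
  intro l
  induction l with
  | nil => intro r rs h; simp at h
  | cons x l ih =>
    intro r rs h
    by_cases hx : pred x
    · rw [List.dropWhile_cons_of_pos hx] at h; exact ih r rs h
    · rw [List.dropWhile_cons_of_neg hx] at h
      cases h; simpa using hx

theorem pvTakeWhile_true {α : Type} : ∀ (l : List α), (l.takeWhile (fun _ => true) = l) ∧ (l.dropWhile (fun _ => true) = []) := by
  intro l
  induction l with
  | nil => simp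
  | cons x l ih => simp [List.takeWhile_cons, List.dropWhile_cons, ih.1, ih.2]

theorem pvBLoop_eq_runs_aux (s : List Int) :
    ∀ (n : Nat) (ps vs : List Int), ps.length + vs.length ≤ n →
    pvBLoop s ps vs = pvBRuns s (pvTM ps vs) := by
  intro n
  induction n with
  | zero =>
    intro ps vs h
    have : ps = [] ∧ vs = [] := by
      constructor <;> (apply List.eq_nil_of_length_eq_zero; omega)
    rcases this with ⟨rfl, rfl⟩
    simp [pvBLoop, pvTM, pvBRuns]
  | succ n ih =>
    intro ps vs h
    cases ps with
    | nil =>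
      cases vs with
      | nil => simp [pvBLoop, pvTM, pvBRuns]
      | cons v vs' =>
        rw [pvBLoop]
        have htm : pvTM [] (v :: vs') = (v, "valley") :: vs'.map (fun t => (t, "valley")) := by
          simp [pvTM]
        rw [htm, pvBRuns]
        have htw : (vs'.map (fun t => (t, "valley"))).takeWhile (fun q => q.2 == "valley")
            = vs'.map (fun t => (t, "valley")) := by
          simp [List.takeWhile_map, Function.comp_def, (pvTakeWhile_true _).1]
        have hdw : (vs'.map (fun t => (t, "valley"))).dropWhile (fun q => q.2 == "valley")
            = [] := by
          simp [List.dropWhile_map, Function.comp_def, (pvTakeWhile_true _).2]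
        simp only [htw, hdw]
        cases vs' with
        | nil => simp [pvBRuns]
        | cons w ws =>
          have hne : PySem.List.min? (v :: w :: ws) (fun t => PySem.List.pyGetD s t 0) ≠ none := by
            simp [PySem.List.min?_eq_none_iff]
          rcases hm : PySem.List.min? (v :: w :: ws) (fun t => PySem.List.pyGetD s t 0) with _ | m
          · exact absurd hm hne
          · have := pvMin_map s "valley" (v :: w :: ws)
            rw [hm] at this
            simp only [List.map_cons] at this
            simp [pvBRuns, this, hm]
    | cons p ps' =>
      cases vs with
      | nil =>
        rw [pvBLoop]
        have htm : pvTM (p :: ps') [] = (p, "peak") :: ps'.map (fun t => (t, "peak")) := by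
          simp [pvTM]
        rw [htm, pvBRuns]
        have htw : (ps'.map (fun t => (t, "peak"))).takeWhile (fun q => q.2 == "peak")
            = ps'.map (fun t => (t, "peak")) := by
          simp [List.takeWhile_map, Function.comp_def, (pvTakeWhile_true _).1]
        have hdw : (ps'.map (fun t => (t, "peak"))).dropWhile (fun q => q.2 == "peak")
            = [] := by
          simp [List.dropWhile_map, Function.comp_def, (pvTakeWhile_true _).2]
        simp only [htw, hdw]
        cases ps' with
        | nil => simp [pvBRuns]
        | cons w ws =>
          have hne : PySem.List.max? (p :: w :: ws) (fun t => PySem.List.pyGetD s t 0) ≠ none := by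
            simp [PySem.List.max?_eq_none_iff]
          rcases hm : PySem.List.max? (p :: w :: ws) (fun t => PySem.List.pyGetD s t 0) with _ | m
          · exact absurd hm hne
          · have := pvMax_map s "peak" (p :: w :: ws)
            rw [hm] at this
            simp only [List.map_cons] at this
            simp [pvBRuns, this, hm]
      | cons v vs' =>
        by_cases hpv : p ≤ v
        · -- peak run at the head
          set run' := ps'.takeWhile (fun t => t ≤ v) with hrun'
          set rest := ps'.dropWhile (fun t => t ≤ v) with hrest
          set T := pvTM rest (v :: vs') with hT
          have htm : pvTM (p :: ps') (v :: vs')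
              = (p, "peak") :: (run'.map (fun i => (i, "peak")) ++ T) := by
            rw [pvTM_peak_run v vs' (p :: ps')]
            simp [List.takeWhile_cons, List.dropWhile_cons, hpv, hrun', hrest, hT]
          have hThead : T.takeWhile (fun q => q.2 == "peak") = [] ∧
              T.dropWhile (fun q => q.2 == "peak") = T := by
            rcases hr : rest with _ | ⟨r, rs⟩
            · rw [hT, hr]
              constructor <;> simp [pvTM]
            · have hrv : ¬ r ≤ v := by
                have := pvDW_head (fun t => decide (t ≤ v)) ps' r rs (by rw [← hrest, hr])
                simpa using this
              rw [hT, hr]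
              constructor <;> simp [pvTM, hrv]
          have htwa := pvTW_app (fun q => q.2 == "peak") (run'.map (fun i => (i, "peak"))) T
            (by intro x hx; rcases List.mem_map.mp hx with ⟨i, _, rfl⟩; simp)
          have hrun_t : ((run'.map (fun i => (i, "peak")) ++ T).takeWhile (fun q => q.2 == "peak"))
              = run'.map (fun i => (i, "peak")) := by
            rw [htwa.1, hThead.1, List.append_nil]
          have hrest_t : ((run'.map (fun i => (i, "peak")) ++ T).dropWhile (fun q => q.2 == "peak")) = T := by
            rw [htwa.2, hThead.2]
          rw [htm, pvBRuns]
          simp only [hrun_t, hrest_t]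
          have hih : pvBRuns s T = pvBLoop s rest (v :: vs') := by
            rw [hT, ih rest (v :: vs') ?_]
            have h1 : rest.length ≤ ps'.length := by rw [hrest]; exact List.length_dropWhile_le _ _
            simp only [List.length_cons] at h ⊢
            omega
          rw [hih, pvBLoop]
          simp only [if_pos hpv, ← hrun', ← hrest]
          congr 1
          -- heads agree
          cases hr' : run' with
          | nil => simp [hr']
          | cons w ws =>
            have hne : PySem.List.max? (p :: w :: ws) (fun t => PySem.List.pyGetD s t 0) ≠ none := by
              simp [PySem.List.max?_eq_none_iff]
            rcases hm : PySem.List.max? (p :: w :: ws) (fun t => PySem.List.pyGetD s t 0) with _ | m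
            · exact absurd hm hne
            · have := pvMax_map s "peak" (p :: w :: ws)
              rw [hm] at this
              simp only [List.map_cons] at this
              simp [this, hm]
        · -- valley run at the head
          have hvp : v < p := by omega
          set run' := vs'.takeWhile (fun t => t < p) with hrun'
          set rest := vs'.dropWhile (fun t => t < p) with hrest
          set T := pvTM (p :: ps') rest with hT
          have htm : pvTM (p :: ps') (v :: vs')
              = (v, "valley") :: (run'.map (fun i => (i, "valley")) ++ T) := by
            rw [pvTM_valley_run p ps' (v :: vs')]
            simp [List.takeWhile_cons, List.dropWhile_cons, hvp, hrun', hrest, hT]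
          have hThead : T.takeWhile (fun q => q.2 == "valley") = [] ∧
              T.dropWhile (fun q => q.2 == "valley") = T := by
            rcases hr : rest with _ | ⟨r, rs⟩
            · rw [hT, hr]
              constructor <;> simp [pvTM]
            · have hrv : ¬ r < p := by
                have := pvDW_head (fun t => decide (t < p)) vs' r rs (by rw [← hrest, hr])
                simpa using this
              have hpr : p ≤ r := by omega
              rw [hT, hr]
              constructor <;> simp [pvTM, hpr]
          have htwa := pvTW_app (fun q => q.2 == "valley") (run'.map (fun i => (i, "valley"))) T
            (by intro x hx; rcases List.mem_map.mp hx with ⟨i, _, rfl⟩; simp)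
          have hrun_t : ((run'.map (fun i => (i, "valley")) ++ T).takeWhile (fun q => q.2 == "valley"))
              = run'.map (fun i => (i, "valley")) := by
            rw [htwa.1, hThead.1, List.append_nil]
          have hrest_t : ((run'.map (fun i => (i, "valley")) ++ T).dropWhile (fun q => q.2 == "valley")) = T := by
            rw [htwa.2, hThead.2]
          rw [htm, pvBRuns]
          simp only [hrun_t, hrest_t]
          have hih : pvBRuns s T = pvBLoop s (p :: ps') rest := by
            rw [hT, ih (p :: ps') rest ?_]
            have h1 : rest.length ≤ vs'.length := by rw [hrest]; exact List.length_dropWhile_le _ _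
            simp only [List.length_cons] at h ⊢
            omega
          rw [hih, pvBLoop]
          simp only [if_neg hpv, ← hrun', ← hrest]
          congr 1
          cases hr' : run' with
          | nil => simp [hr']
          | cons w ws =>
            have hne : PySem.List.min? (v :: w :: ws) (fun t => PySem.List.pyGetD s t 0) ≠ none := by
              simp [PySem.List.min?_eq_none_iff]
            rcases hm : PySem.List.min? (v :: w :: ws) (fun t => PySem.List.pyGetD s t 0) with _ | m
            · exact absurd hm hne
            · have := pvMin_map s "valley" (v :: w :: ws)
              rw [hm] at this
              simp only [List.map_cons] at this
              simp [this, hm]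

theorem pvBLoop_eq_runs (s : List Int) : ∀ (ps vs : List Int),
    pvBLoop s ps vs = pvBRuns s (pvTM ps vs) := by
  intro ps vs
  exact pvBLoop_eq_runs_aux s (ps.length + vs.length) ps vs le_rfl

-- ========== A's fold = run reduction of the merged stream (held over) ==========

theorem pvAStep_ne_nil (s : List Int) (acc : List (Int × String)) (p : Int × String) :
    pvAStep s acc p ≠ [] := by
  unfold pvAStep
  cases h : acc.getLast? with
  | none => simp
  | some prev =>
    have hacc : acc ≠ [] := by
      intro h'; subst h'; simp at h
    dsimp only
    split_ifs <;> simp [hacc]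

theorem pvAStep_append (s : List Int) (acc ys : List (Int × String)) (p : Int × String)
    (hys : ys ≠ []) : pvAStep s (acc ++ ys) p = acc ++ pvAStep s ys p := by
  unfold pvAStep
  rw [List.getLast?_append_of_ne_nil _ hys]
  cases ys.getLast? with
  | none => simp
  | some prev =>
    have hd : (acc ++ ys).dropLast = acc ++ ys.dropLast := by
      cases ys with
      | nil => exact absurd rfl hys
      | cons a l => simp
    dsimp only
    split_ifs <;> simp [hd]

theorem pvFold_append (s : List Int) (xs : List (Int × String)) :
    ∀ (acc ys : List (Int × String)), ys ≠ [] →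
    xs.foldl (pvAStep s) (acc ++ ys) = acc ++ xs.foldl (pvAStep s) ys := by
  induction xs with
  | nil => intro acc ys _; simp
  | cons p xs ih =>
    intro acc ys hys
    simp only [List.foldl_cons]
    rw [pvAStep_append s acc ys p hys, ih acc _ (pvAStep_ne_nil s ys p)]

theorem pvMerge_eq_runs (s : List Int) :
    ∀ (xs : List (Int × String)) (q : Int × String),
    (q.2 = "peak" ∨ q.2 = "valley") → (∀ x ∈ xs, x.2 = "peak" ∨ x.2 = "valley") →
    xs.foldl (pvAStep s) [q] = pvBRuns s (q :: xs) := by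
  intro xs
  induction xs with
  | nil =>
    intro q _ _
    simp [pvBRuns]
  | cons p xs ih =>
    intro q hq hx
    have hp : p.2 = "peak" ∨ p.2 = "valley" := hx p (by simp)
    have hx' : ∀ x ∈ xs, x.2 = "peak" ∨ x.2 = "valley" := fun x h => hx x (by simp [h])
    by_cases hk : p.2 = q.2
    · -- same kind: A overwrites (or keeps) the saved element; B extends the run
      have step : pvAStep s [q] p =
          [if (q.2 = "peak" ∧ PySem.List.pyGetD s q.1 0 < PySem.List.pyGetD s p.1 0) ∨
              (q.2 = "valley" ∧ PySem.List.pyGetD s p.1 0 < PySem.List.pyGetD s q.1 0)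
           then p else q] := by
        unfold pvAStep
        rcases hq with h | h <;>
          simp [List.getLast?, hk, h] <;> split_ifs <;> simp_all <;> omega
      set b : Int × String :=
        if (q.2 = "peak" ∧ PySem.List.pyGetD s q.1 0 < PySem.List.pyGetD s p.1 0) ∨
           (q.2 = "valley" ∧ PySem.List.pyGetD s p.1 0 < PySem.List.pyGetD s q.1 0)
        then p else q with hb
      have hbk : b.2 = q.2 := by rw [hb]; split_ifs <;> simp [hk]
      have hbpv : b.2 = "peak" ∨ b.2 = "valley" := by rw [hbk]; exact hq
      have ihx := ih b hbpv hx'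
      simp only [List.foldl_cons, step] at *
      rw [ihx]
      rw [pvBRuns, pvBRuns]
      have htw : (p :: xs).takeWhile (fun r => r.2 == q.2) =
          p :: xs.takeWhile (fun r => r.2 == q.2) := by
        simp [hk]
      have hdw : (p :: xs).dropWhile (fun r => r.2 == q.2) =
          xs.dropWhile (fun r => r.2 == q.2) := by
        simp [hk]
      simp only [hbk, htw, hdw]
      congr 1
      rcases hq with h | h
      · have hnv : ¬ q.2 = "valley" := by rw [h]; decide
        have hmax : PySem.List.max? (q :: p :: xs.takeWhile (fun r => r.2 == "peak"))
            (fun x => PySem.List.pyGetD s x.1 0) =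
            PySem.List.max? (b :: xs.takeWhile (fun r => r.2 == "peak"))
            (fun x => PySem.List.pyGetD s x.1 0) := by
          simp only [PySem.List.max?, List.foldl_cons, hb, h]
          congr 1
          split_ifs <;> simp_all <;> omega
        rw [h]
        cases ht : xs.takeWhile (fun r => r.2 == "peak") with
        | nil =>
          rw [ht] at hmax
          simp [hmax, PySem.List.max?, hb, h]
          by_cases hcmp : PySem.List.pyGetD s q.1 0 < PySem.List.pyGetD s p.1 0 <;>
            simp [hb, h, hcmp]
        | cons y t =>
          rw [ht] at hmax
          simp [hmax, hnv]
          rcases hsome : PySem.List.max? (b :: y :: t)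
              (fun x => PySem.List.pyGetD s x.1 0) with _ | m
          · rw [PySem.List.max?_eq_none_iff] at hsome; simp at hsome
          · simp [hsome]
      · have hnp : ¬ q.2 = "peak" := by rw [h]; decide
        have hmin : PySem.List.min? (q :: p :: xs.takeWhile (fun r => r.2 == "valley"))
            (fun x => PySem.List.pyGetD s x.1 0) =
            PySem.List.min? (b :: xs.takeWhile (fun r => r.2 == "valley"))
            (fun x => PySem.List.pyGetD s x.1 0) := by
          simp only [PySem.List.min?, List.foldl_cons, hb, h]
          congr 1
          split_ifs <;> simp_all <;> omega
        rw [h]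
        cases ht : xs.takeWhile (fun r => r.2 == "valley") with
        | nil =>
          rw [ht] at hmin
          simp [hmin, PySem.List.min?, hb, h, hnp]
          by_cases hcmp : PySem.List.pyGetD s p.1 0 < PySem.List.pyGetD s q.1 0 <;>
            simp [hb, h, hcmp]
        | cons y t =>
          rw [ht] at hmin
          simp [hmin, hnp]
          rcases hsome : PySem.List.min? (b :: y :: t)
              (fun x => PySem.List.pyGetD s x.1 0) with _ | m
          · rw [PySem.List.min?_eq_none_iff] at hsome; simp at hsome
          · simp [hsome]
    · -- kind changes: A appends; B closes the singleton run at q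
      have step : pvAStep s [q] p = [q] ++ [p] := by
        unfold pvAStep; simp [List.getLast?, hk]
      have ihx := ih p hp hx'
      simp only [List.foldl_cons, step]
      rw [pvFold_append s xs [q] [p] (by simp), ihx]
      conv_rhs => rw [pvBRuns]
      have htw : (p :: xs).takeWhile (fun r => r.2 == q.2) = [] := by
        simp [hk]
      have hdw : (p :: xs).dropWhile (fun r => r.2 == q.2) = p :: xs := by
        simp [hk]
      simp only [htw, hdw]
      simp

-- ===== VERDICT (by name: the statement is the Claim_ definition above) =====
theorem build_alternating_extrema_spec : Claim_equal_build_alternating_extrema := by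
  intro peaks valleys smoothed _ _
  unfold Spec_build_alternating_extrema build_alternating_extrema build_alternating_extrema_alt
  have hmain : ∀ (l : List (Int × String)), (∀ x ∈ l, x.2 = "peak" ∨ x.2 = "valley") →
      l.foldl (pvAStep smoothed) [] = pvBRuns smoothed l := by
    intro l hl
    match l, hl with
    | [], _ => simp [pvBRuns]
    | q :: xs, hl =>
      have h0 : pvAStep smoothed [] q = [q] := by unfold pvAStep; simp
      simp only [List.foldl_cons, h0]
      exact pvMerge_eq_runs smoothed xs q (hl q (by simp)) (fun x h => hl x (by simp [h]))
  rw [hmain _ (by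
    intro x hx
    rw [PySem.List.mem_sorted] at hx
    rcases List.mem_append.mp hx with h | h <;>
      rcases List.mem_map.mp h with ⟨i, _, rfl⟩ <;> simp)]
  rw [pvSorted_append, pvSorted_map_tag, pvSorted_map_tag, pvMergeT_map_eq_TM,
    pvBLoop_eq_runs]
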